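-- pv_equiv track=rewrite | github.com/errord/EventTimeFormat | event_time_format.py | is_continuation_week
-- ===== SOURCE A (Python) =====
-- def is_continuation_week(event_weekdays):
--     """
--     continuation week
--     """
--     weekday_len = len(event_weekdays)
--     if weekday_len < 3:
--         return False
--
--     for idx, week in enumerate(event_weekdays):
--         if idx + 1 < weekday_len:
--             if week+1 != event_weekdays[idx+1]:
--                 return False
--     return True
-- ===== SOURCE B (Python) =====
-- def is_continuation_week(event_weekdays):
--     """
--     continuation week
--     """
--     n = len(event_weekdays)
--     if n < 3:
--         return False
--     start = event_weekdays[0]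
--     return event_weekdays == list(range(start, start + n))
-- ===== Notes on version B (the rewrite author's own statement) =====
-- stated objective: simpler
-- what changed: Replaces the indexed adjacent-pair scan with early return by constructing the canonical consecutive run list(range(start, start+n)) and comparing it to the input once.
import Mathlib
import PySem

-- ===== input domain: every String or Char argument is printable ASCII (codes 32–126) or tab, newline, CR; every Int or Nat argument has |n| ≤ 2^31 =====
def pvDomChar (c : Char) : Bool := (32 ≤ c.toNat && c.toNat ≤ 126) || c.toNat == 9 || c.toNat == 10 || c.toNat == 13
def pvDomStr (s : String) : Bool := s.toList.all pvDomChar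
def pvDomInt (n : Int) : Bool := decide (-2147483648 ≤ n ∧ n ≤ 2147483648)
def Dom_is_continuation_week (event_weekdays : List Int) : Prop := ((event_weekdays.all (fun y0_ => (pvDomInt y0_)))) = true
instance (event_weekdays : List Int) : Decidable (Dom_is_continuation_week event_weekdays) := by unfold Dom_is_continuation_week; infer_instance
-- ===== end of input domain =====

-- ===== PORT A =====
-- B constructs the expected consecutive run and compares once, instead of A's adjacent-pair scan (simpler).
-- A's loop: for each adjacent pair, return False unless week+1 == next; early return modelled by recursion.
def pvChainA : Int → List Int → Bool
  | _, [] => true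
  | w, y :: rest => if w + 1 ≠ y then false else pvChainA y rest

def is_continuation_week (event_weekdays : List Int) : Bool :=
  if event_weekdays.length < 3 then false
  else
    match event_weekdays with
    | [] => true
    | x :: rest => pvChainA x rest

-- ===== PORT B =====
def is_continuation_week_alt (event_weekdays : List Int) : Bool :=
  if event_weekdays.length < 3 then false
  else
    match event_weekdays with
    | [] => false   -- unreachable: length ≥ 3
    | x :: _ =>
        event_weekdays = PySem.List.pyRange x (x + (event_weekdays.length : Int)) 1

-- ===== PRECONDITION & SPEC =====
def Spec_is_continuation_week (event_weekdays : List Int) (out : Bool) : Prop := out = is_continuation_week_alt event_weekdays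
instance (event_weekdays : List Int) (out : Bool) : Decidable (Spec_is_continuation_week event_weekdays out) := by unfold Spec_is_continuation_week; infer_instance

-- ===== CLAIM (what is proved, stated in full; the proofs are below) =====
def Claim_equal_is_continuation_week : Prop := ∀ (event_weekdays : List Int), Dom_is_continuation_week event_weekdays → Spec_is_continuation_week event_weekdays (is_continuation_week event_weekdays)

-- ===== LEMMAS AND PROOFS =====

theorem pvChainA_eq_range (rest : List Int) : ∀ x : Int,
    pvChainA x rest = decide (x :: rest = PySem.List.pyRange x (x + ((rest.length : Int) + 1)) 1) := by
  induction rest with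
  | nil =>
      intro x
      simp [pvChainA, PySem.List.pyRange_one_singleton x]
  | cons y rs ih =>
      intro x
      have hlt : x < x + (((y :: rs).length : Int) + 1) := by
        simp; omega
      rw [PySem.List.pyRange_one_cons hlt]
      by_cases h : x + 1 = y
      · subst h
        have e : x + ((((x + 1) :: rs).length : Int) + 1) = (x + 1) + ((rs.length : Int) + 1) := by
          simp only [List.length_cons]; push_cast; ring
        rw [e]
        simp [pvChainA, ih]
      · simp [pvChainA, h]
        intro he
        have h2 : x + 1 < x + ((rs.length : Int) + 1 + 1) := by omega
        rw [PySem.List.pyRange_one_cons h2] at he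
        exact h ((List.cons.injEq _ _ _ _).mp he).1.symm

-- ===== VERDICT (by name: the statement is the Claim_ definition above) =====
theorem is_continuation_week_spec : Claim_equal_is_continuation_week := by
  intro xs _
  unfold Spec_is_continuation_week is_continuation_week is_continuation_week_alt
  cases xs with
  | nil => simp
  | cons x rest =>
      by_cases h : (x :: rest).length < 3
      · rw [if_pos h, if_pos h]
      · rw [if_neg h, if_neg h]
        show pvChainA x rest =
          decide (x :: rest = PySem.List.pyRange x (x + ((x :: rest).length : Int)) 1)
        have e : x + (((x :: rest).length : Int)) = x + ((rest.length : Int) + 1) := by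
          simp only [List.length_cons]; push_cast; ring
        rw [pvChainA_eq_range rest x, e]
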